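-- pv_equiv track=rewrite | github.com/lorenaleao/code-challenges | algomonster/bs_newspapers.py | newspapers_split
-- ===== SOURCE A (Python) =====
-- from typing import List
--
-- def check(newspapers_read_times: List[int], num_coworkers: int, time: int) -> bool:
--     # Initialize the sum of reading times for the current worker
--     timeSum = 0
--     # Iterate over each newspaper's read time
--     for read_time in newspapers_read_times:
--         # If adding the current newspaper's read time doesn't exceed the limit, add it to the current worker's time sum
--         if timeSum + read_time <= time:
--             timeSum += read_time
--         else:
--             # If it does exceed, switch to the next coworker
--             num_coworkers -= 1
--             # If there are no coworkers left, it's not possible to read all newspapers within the time limit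
--             if num_coworkers == 0:
--                 return False
--             # Start summing reading times for the next worker
--             timeSum = read_time
--     # If you went through all newspapers without running out of coworkers, it's possible
--     return True
--
-- def newspapers_split(newspapers_read_times: List[int], num_coworkers: int) -> int:
--     l = max(newspapers_read_times)
--     r = sum(newspapers_read_times)
--     minTime = -1
--     while l <= r:
--         m = l + (r-l)//2
--         if check(newspapers_read_times, num_coworkers, m):
--             minTime = m
--             r = m - 1
--         else:
--             l = m + 1
--
--     return minTime
-- ===== SOURCE B (Python) =====
-- from typing import List
--
-- def newspapers_split(newspapers_read_times: List[int], num_coworkers: int) -> int: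
--     total = sum(newspapers_read_times)
--     m = max(newspapers_read_times)
--     # Scan candidate time limits upward, starting at the smallest possible one.
--     while m <= total:
--         # Greedily count the workers needed for limit m, remembering the smallest
--         # overflowing segment sum: no limit below it changes any greedy decision.
--         count, running, nxt = 1, 0, total + 1
--         for t in newspapers_read_times:
--             if running + t <= m:
--                 running += t
--             else:
--                 count += 1
--                 nxt = min(nxt, running + t)
--                 running = t
--         if count <= num_coworkers:
--             return m
--         m = nxt  # the first limit at which the greedy outcome can change
--     return -1
-- ===== Notes on version B (the rewrite author's own statement) =====
-- stated objective: simpler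
-- what changed: Replaces the binary search over the answer range by a direct linear scan returning the first feasible limit, and replaces the decrementing early-return feasibility check by a greedy count of the workers needed compared against num_coworkers.
-- outside the precondition, e.g. on newspapers_split([8, 1, -4, 8, 2], 2): A returns 10, B returns 8; on newspapers_split([1, 2], 0): A returns 2, B returns -1
import Mathlib
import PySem

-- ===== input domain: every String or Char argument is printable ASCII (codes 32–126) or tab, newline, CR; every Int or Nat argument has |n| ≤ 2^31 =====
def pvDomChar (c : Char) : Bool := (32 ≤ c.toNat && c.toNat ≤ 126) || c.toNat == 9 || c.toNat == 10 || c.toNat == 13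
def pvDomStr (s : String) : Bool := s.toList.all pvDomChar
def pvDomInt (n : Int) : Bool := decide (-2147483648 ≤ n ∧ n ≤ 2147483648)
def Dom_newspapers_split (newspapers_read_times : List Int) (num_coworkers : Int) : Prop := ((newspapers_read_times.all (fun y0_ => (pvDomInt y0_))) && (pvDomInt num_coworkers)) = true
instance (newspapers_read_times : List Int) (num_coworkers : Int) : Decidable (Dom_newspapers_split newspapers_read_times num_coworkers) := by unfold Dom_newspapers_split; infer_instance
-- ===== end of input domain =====

-- B replaces A's binary search over the answer range by a linear scan for the first
-- feasible limit, with a worker-counting greedy feasibility test (objective: simpler).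

-- ===== PORT A =====
-- A's `check`: loop state is (remaining coworkers, current running sum); early return False.
def pvCheckLoop (time : Int) : List Int → Int → Int → Bool
  | [], _, _ => true
  | rt :: rest, k, s =>
    if s + rt ≤ time then pvCheckLoop time rest k (s + rt)
    else if k - 1 = 0 then false
    else pvCheckLoop time rest (k - 1) rt

def pvCheck (newspapers_read_times : List Int) (num_coworkers time : Int) : Bool :=
  pvCheckLoop time newspapers_read_times num_coworkers 0

-- A's while-loop, state (l, r, minTime); the Nat fuel (initially r+1-l, an iteration bound)
-- only makes the loop total, m is Python's `m = l + (r-l)//2` written inline.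
def pvBSearchFuel (ts : List Int) (k : Int) : Nat → Int → Int → Int → Int
  | 0, _, _, minTime => minTime
  | fuel + 1, l, r, minTime =>
    if l ≤ r then
      if pvCheck ts k (l + PySem.Int.floordiv (r - l) 2) then
        pvBSearchFuel ts k fuel l (l + PySem.Int.floordiv (r - l) 2 - 1)
          (l + PySem.Int.floordiv (r - l) 2)
      else pvBSearchFuel ts k fuel (l + PySem.Int.floordiv (r - l) 2 + 1) r minTime
    else minTime

-- Python `max(xs)` raises on []; Pre_ excludes []. `.getD 0` is never reached under Pre_.
def newspapers_split (newspapers_read_times : List Int) (num_coworkers : Int) : Int :=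
  let l := (PySem.List.max? newspapers_read_times (fun y => y)).getD 0
  let r := newspapers_read_times.sum
  pvBSearchFuel newspapers_read_times num_coworkers (r + 1 - l).toNat l r (-1)

-- ===== PORT B =====
-- B's inner loop: greedy worker count for limit m, tracking nxt, the smallest overflowing
-- segment sum; state (count, running, nxt), returns (count, nxt).
def pvJumpLoop (m : Int) : List Int → Int → Int → Int → Int × Int
  | [], count, _, nxt => (count, nxt)
  | t :: rest, count, running, nxt =>
    if running + t ≤ m then pvJumpLoop m rest count (running + t) nxt
    else pvJumpLoop m rest (count + 1) t (min nxt (running + t))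

-- B's while-loop over candidate limits m; the Nat fuel (initially total+1-m, a bound on
-- the strictly increasing m) only makes the loop total.
def pvJumpScanFuel (ts : List Int) (k total : Int) : Nat → Int → Int
  | 0, _ => -1
  | fuel + 1, m =>
    if m ≤ total then
      if (pvJumpLoop m ts 1 0 (total + 1)).1 ≤ k then m
      else pvJumpScanFuel ts k total fuel (pvJumpLoop m ts 1 0 (total + 1)).2
    else -1

def newspapers_split_alt (newspapers_read_times : List Int) (num_coworkers : Int) : Int :=
  let total := newspapers_read_times.sum
  let m := (PySem.List.max? newspapers_read_times (fun y => y)).getD 0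
  pvJumpScanFuel newspapers_read_times num_coworkers total (total + 1 - m).toNat m

-- ===== PRECONDITION & SPEC =====
-- Pre_ covers the problem's natural domain — a nonempty list (Python's max([]) raises
-- ValueError on []), nonnegative read times, at least one coworker — and additionally any
-- (possibly negative) read times when the papers number fewer than the coworkers or there is
-- a single paper.  Excluded while A still returns: num_coworkers ≤ 0 (outside the natural
-- domain) and multi-paper lists with negative read times not covered above (also outside the
-- natural domain: there the greedy feasibility check is non-monotone and a binary search and
-- a linear scan are both defensible answers that can disagree).
def Pre_newspapers_split (newspapers_read_times : List Int) (num_coworkers : Int) : Prop :=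
  newspapers_read_times ≠ [] ∧ 1 ≤ num_coworkers ∧
    ((∀ t ∈ newspapers_read_times, 0 ≤ t) ∨
      (newspapers_read_times.length : Int) < num_coworkers ∨
      newspapers_read_times.length = 1)
instance (newspapers_read_times : List Int) (num_coworkers : Int) : Decidable (Pre_newspapers_split newspapers_read_times num_coworkers) := by unfold Pre_newspapers_split; infer_instance

def pvWitness_newspapers_split : List Int × Int := ([1, 2, 3], 2)

def Spec_newspapers_split (newspapers_read_times : List Int) (num_coworkers : Int) (out : Int) : Prop := out = newspapers_split_alt newspapers_read_times num_coworkers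
instance (newspapers_read_times : List Int) (num_coworkers : Int) (out : Int) : Decidable (Spec_newspapers_split newspapers_read_times num_coworkers out) := by unfold Spec_newspapers_split; infer_instance

-- ===== CLAIM (what is proved, stated in full; the proofs are below) =====
def Claim_equal_newspapers_split : Prop := ∀ (newspapers_read_times : List Int) (num_coworkers : Int), Dom_newspapers_split newspapers_read_times num_coworkers → Pre_newspapers_split newspapers_read_times num_coworkers → Spec_newspapers_split newspapers_read_times num_coworkers (newspapers_split newspapers_read_times num_coworkers)

-- ===== LEMMAS AND PROOFS =====

-- proof-only abstraction: the greedy worker count alone (the first component of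
-- pvJumpLoop, and what A's check decides against)
def pvSegLoop (m : Int) : List Int → Int → Int → Int
  | [], count, _ => count
  | t :: rest, count, running =>
    if running + t ≤ m then pvSegLoop m rest count (running + t)
    else pvSegLoop m rest (count + 1) t

-- the count accumulator of pvSegLoop is a pure offset
theorem pv_seg_shift (m : Int) : ∀ (ts : List Int) (c s : Int),
    pvSegLoop m ts c s = (c - 1) + pvSegLoop m ts 1 s
  | [], c, s => by simp [pvSegLoop]
  | t :: rest, c, s => by
    simp only [pvSegLoop]
    split_ifs with h
    · exact pv_seg_shift m rest c (s + t)
    · rw [pv_seg_shift m rest (c + 1) t, pv_seg_shift m rest (1 + 1) t]; omega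

theorem pv_seg_ge (m : Int) : ∀ (ts : List Int) (c s : Int), c ≤ pvSegLoop m ts c s
  | [], c, s => by simp [pvSegLoop]
  | t :: rest, c, s => by
    simp only [pvSegLoop]
    split_ifs with h
    · exact pv_seg_ge m rest c (s + t)
    · have := pv_seg_ge m rest (c + 1) t; omega

-- A's check agrees with B's worker count, for ≥ 1 coworkers
theorem pv_check_eq_seg (time : Int) : ∀ (ts : List Int) (k s : Int), 1 ≤ k →
    pvCheckLoop time ts k s = decide (pvSegLoop time ts 1 s ≤ k)
  | [], k, s, hk => by simp [pvCheckLoop, pvSegLoop, hk]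
  | t :: rest, k, s, hk => by
    simp only [pvCheckLoop, pvSegLoop]
    split_ifs with h1 h2
    · exact pv_check_eq_seg time rest k (s + t) hk
    · have h3 := pv_seg_ge time rest 2 t
      simp only [show (1:Int) + 1 = 2 by decide]
      simp only [Bool.false_eq, decide_eq_false_iff_not, not_le]
      omega
    · rw [pv_check_eq_seg time rest (k - 1) t (by omega),
        pv_seg_shift time rest (1 + 1) t]
      simp only [decide_eq_decide]
      omega

-- monotonicity of the greedy worker count (state-dominance form)
theorem pv_seg_mono : ∀ (ts : List Int), (∀ t ∈ ts, 0 ≤ t) →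
    ∀ (time time' c c' s s' : Int), time ≤ time' → 0 ≤ s → 0 ≤ s' →
    (c' < c ∨ (c' = c ∧ s' ≤ s)) →
    pvSegLoop time' ts c' s' ≤ pvSegLoop time ts c s
  | [], _, time, time', c, c', s, s', ht, hs, hs', hdom => by
    simp only [pvSegLoop]; omega
  | t :: rest, hnn, time, time', c, c', s, s', ht, hs, hs', hdom => by
    have h0t : 0 ≤ t := hnn t (List.mem_cons_self ..)
    have hr : ∀ t ∈ rest, 0 ≤ t := fun x hx => hnn x (List.mem_cons_of_mem _ hx)
    simp only [pvSegLoop]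
    split_ifs with h1 h2 h2
    · exact pv_seg_mono rest hr time time' c c' (s + t) (s' + t) ht (by omega) (by omega) (by omega)
    · exact pv_seg_mono rest hr time time' (c + 1) c' t (s' + t) ht (by omega) (by omega) (by omega)
    · exact pv_seg_mono rest hr time time' c (c' + 1) (s + t) t ht (by omega) (by omega) (by omega)
    · exact pv_seg_mono rest hr time time' (c + 1) (c' + 1) t t ht (by omega) (by omega) (by omega)

-- the greedy worker count never exceeds 1 + number of papers
theorem pv_seg_le (m : Int) : ∀ (ts : List Int) (c s : Int),
    pvSegLoop m ts c s ≤ c + ts.length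
  | [], c, s => by simp [pvSegLoop]
  | t :: rest, c, s => by
    simp only [pvSegLoop, List.length_cons]
    split_ifs with h
    · have := pv_seg_le m rest c (s + t); push_cast at *; omega
    · have := pv_seg_le m rest (c + 1) t; push_cast at *; omega

-- pvJumpLoop's count is the greedy worker count
theorem pv_jump_count (m : Int) : ∀ (ts : List Int) (c s nxt : Int),
    (pvJumpLoop m ts c s nxt).1 = pvSegLoop m ts c s
  | [], c, s, nxt => rfl
  | t :: rest, c, s, nxt => by
    simp only [pvJumpLoop, pvSegLoop]
    split_ifs with h
    · exact pv_jump_count m rest c (s + t) nxt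
    · exact pv_jump_count m rest (c + 1) t (min nxt (s + t))

theorem pv_jump_le (m : Int) : ∀ (ts : List Int) (c s nxt : Int),
    (pvJumpLoop m ts c s nxt).2 ≤ nxt
  | [], c, s, nxt => le_rfl
  | t :: rest, c, s, nxt => by
    simp only [pvJumpLoop]
    split_ifs with h
    · exact pv_jump_le m rest c (s + t) nxt
    · exact le_trans (pv_jump_le m rest (c + 1) t (min nxt (s + t))) (min_le_left _ _)

theorem pv_jump_gt (m : Int) : ∀ (ts : List Int) (c s nxt : Int), m < nxt →
    m < (pvJumpLoop m ts c s nxt).2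
  | [], c, s, nxt, h => h
  | t :: rest, c, s, nxt, h => by
    simp only [pvJumpLoop]
    split_ifs with h1
    · exact pv_jump_gt m rest c (s + t) nxt h
    · exact pv_jump_gt m rest (c + 1) t (min nxt (s + t)) (by omega)

-- below nxt, every limit ≥ m drives the greedy through the same decisions
theorem pv_jump_const (m m' : Int) (hmm : m ≤ m') : ∀ (ts : List Int) (c s nxt : Int),
    m' < (pvJumpLoop m ts c s nxt).2 → pvSegLoop m' ts c s = pvSegLoop m ts c s
  | [], c, s, nxt, _ => rfl
  | t :: rest, c, s, nxt, h => by
    simp only [pvJumpLoop] at h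
    simp only [pvSegLoop]
    by_cases h1 : s + t ≤ m
    · rw [if_pos h1] at h
      rw [if_pos (by omega : s + t ≤ m'), if_pos h1]
      exact pv_jump_const m m' hmm rest c (s + t) nxt h
    · rw [if_neg h1] at h
      have hle := pv_jump_le m rest (c + 1) t (min nxt (s + t))
      rw [if_neg (by omega : ¬ s + t ≤ m'), if_neg h1]
      exact pv_jump_const m m' hmm rest (c + 1) t (min nxt (s + t)) h

theorem pv_jscan_none (ts : List Int) (k total : Int) : ∀ (n : Nat) (m : Int),
    (total + 1 - m).toNat ≤ n → (∀ j, m ≤ j → j ≤ total → ¬ (pvSegLoop j ts 1 0 ≤ k)) →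
    pvJumpScanFuel ts k total n m = -1 := by
  intro n
  induction n with
  | zero => intro m hn h; rfl
  | succ n ih =>
    intro m hn h
    simp only [pvJumpScanFuel, pv_jump_count]
    split_ifs with h1 h2
    · exact absurd h2 (h m le_rfl h1)
    · have hgt : m < (pvJumpLoop m ts 1 0 (total + 1)).2 :=
        pv_jump_gt m ts 1 0 (total + 1) (by omega)
      exact ih _ (by omega) (fun j hj1 hj2 => h j (by omega) hj2)
    · rfl

theorem pv_jscan_first (ts : List Int) (k total : Int) : ∀ (n : Nat) (m j : Int),
    (total + 1 - m).toNat ≤ n → m ≤ j → j ≤ total → pvSegLoop j ts 1 0 ≤ k →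
    (∀ i, m ≤ i → i < j → ¬ (pvSegLoop i ts 1 0 ≤ k)) →
    pvJumpScanFuel ts k total n m = j := by
  intro n
  induction n with
  | zero => intro m j hn h1 h2 _ _; omega
  | succ n ih =>
    intro m j hn hmj hjt hj hmin
    simp only [pvJumpScanFuel, pv_jump_count]
    rw [if_pos (by omega)]
    split_ifs with h2
    · by_contra hne
      exact hmin m le_rfl (by omega) h2
    · have hgt : m < (pvJumpLoop m ts 1 0 (total + 1)).2 :=
        pv_jump_gt m ts 1 0 (total + 1) (by omega)
      have hjge : (pvJumpLoop m ts 1 0 (total + 1)).2 ≤ j := by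
        by_contra hlt
        exact absurd (pv_jump_const m j hmj ts 1 0 (total + 1) (by omega) ▸ hj) h2
      exact ih _ j (by omega) hjge hjt hj (fun i hi1 hi2 => hmin i (by omega) hi2)

-- the binary search returns -1 if nothing in [L0,R0] is feasible, else the least feasible value
theorem pv_bsearch_spec (ts : List Int) (k L0 R0 : Int) (hk : 1 ≤ k)
    (hmono : ∀ a b : Int, a ≤ b → pvSegLoop a ts 1 0 ≤ k → pvSegLoop b ts 1 0 ≤ k) :
    ∀ (n : Nat) (l r minTime : Int), (r + 1 - l).toNat ≤ n → L0 ≤ l → r ≤ R0 →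
    (∀ i, L0 ≤ i → i < l → ¬ (pvSegLoop i ts 1 0 ≤ k)) →
    ((minTime = -1 ∧ r = R0) ∨
      (pvSegLoop minTime ts 1 0 ≤ k ∧ minTime = r + 1 ∧ L0 ≤ minTime ∧ minTime ≤ R0)) →
    (pvBSearchFuel ts k n l r minTime = -1 ∧ ∀ j, L0 ≤ j → j ≤ R0 → ¬ (pvSegLoop j ts 1 0 ≤ k)) ∨
    (L0 ≤ pvBSearchFuel ts k n l r minTime ∧ pvBSearchFuel ts k n l r minTime ≤ R0 ∧
      pvSegLoop (pvBSearchFuel ts k n l r minTime) ts 1 0 ≤ k ∧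
      ∀ i, L0 ≤ i → i < pvBSearchFuel ts k n l r minTime → ¬ (pvSegLoop i ts 1 0 ≤ k)) := by
  intro n
  induction n with
  | zero =>
    intro l r minTime hn hL hr hnotP hinv
    simp only [pvBSearchFuel]
    rcases hinv with ⟨h1, h2⟩ | ⟨hP, heq, hL0, hR0⟩
    · exact Or.inl ⟨h1, fun j hj1 hj2 => hnotP j hj1 (by omega)⟩
    · exact Or.inr ⟨hL0, hR0, hP, fun i hi1 hi2 => hnotP i hi1 (by omega)⟩
  | succ n ih =>
    intro l r minTime hn hL hr hnotP hinv
    simp only [pvBSearchFuel]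
    by_cases h1 : l ≤ r
    · rw [if_pos h1]
      have hfd : PySem.Int.floordiv (r - l) 2 = (r - l) / 2 :=
        PySem.Int.floordiv_eq_ediv_of_pos (by decide)
      set m := l + PySem.Int.floordiv (r - l) 2 with hm
      have hb1 : l ≤ m := by omega
      have hb2 : m ≤ r := by omega
      have hcb : pvCheck ts k m = decide (pvSegLoop m ts 1 0 ≤ k) :=
        pv_check_eq_seg m ts k 0 hk
      rw [hcb]
      by_cases hP : pvSegLoop m ts 1 0 ≤ k
      · simp only [hP, decide_true, if_true]
        exact ih l (m - 1) m (by omega) hL (by omega) hnotP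
          (Or.inr ⟨hP, by omega, by omega, by omega⟩)
      · simp only [hP, decide_false, Bool.false_eq_true, if_false]
        refine ih (m + 1) r minTime (by omega) (by omega) hr ?_ hinv
        intro i hi1 hi2 hPi
        rcases lt_or_ge i l with h | h
        · exact hnotP i hi1 h hPi
        · exact hP (hmono i m (by omega) hPi)
    · rw [if_neg h1]
      rcases hinv with ⟨hq1, hq2⟩ | ⟨hP, heq, hL0, hR0⟩
      · exact Or.inl ⟨hq1, fun j hj1 hj2 => hnotP j hj1 (by omega)⟩
      · exact Or.inr ⟨hL0, hR0, hP, fun i hi1 hi2 => hnotP i hi1 (by omega)⟩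

-- ===== VERDICT (by name: the statement is the Claim_ definition above) =====
theorem newspapers_split_spec : Claim_equal_newspapers_split := by
  intro ts k _ hpre
  obtain ⟨hne, hk, hcase⟩ := hpre
  unfold Spec_newspapers_split
  show pvBSearchFuel ts k (ts.sum + 1 - (PySem.List.max? ts (fun y => y)).getD 0).toNat
      ((PySem.List.max? ts (fun y => y)).getD 0) ts.sum (-1) =
    pvJumpScanFuel ts k ts.sum (ts.sum + 1 - (PySem.List.max? ts (fun y => y)).getD 0).toNat
      ((PySem.List.max? ts (fun y => y)).getD 0)
  set L0 := (PySem.List.max? ts (fun y => y)).getD 0 with hL0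
  set R0 := ts.sum with hR0
  have hmono : ∀ a b : Int, a ≤ b → pvSegLoop a ts 1 0 ≤ k → pvSegLoop b ts 1 0 ≤ k := by
    rcases hcase with hnn | hlen | hone
    · intro a b hab h
      exact le_trans (pv_seg_mono ts hnn a b 1 1 0 0 hab le_rfl le_rfl (Or.inr ⟨rfl, le_rfl⟩)) h
    · intro a b hab h
      have := pv_seg_le b ts 1 0
      omega
    · intro a b hab h
      match ts, hone with
      | [t], _ =>
        simp only [pvSegLoop] at h ⊢
        split_ifs at h ⊢ <;> omega
  have hspec := pv_bsearch_spec ts k L0 R0 hk hmono ((R0 + 1 - L0).toNat) L0 R0 (-1)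
    le_rfl le_rfl le_rfl (by intro i hi1 hi2; exact absurd hi1 (by omega)) (Or.inl ⟨rfl, rfl⟩)
  rcases hspec with ⟨heq, hall⟩ | ⟨h1, h2, h3, h4⟩
  · rw [heq, pv_jscan_none ts k R0 ((R0 + 1 - L0).toNat) L0 le_rfl (fun j hj1 hj2 => hall j hj1 hj2)]
  · rw [pv_jscan_first ts k R0 ((R0 + 1 - L0).toNat) L0
      (pvBSearchFuel ts k ((R0 + 1 - L0).toNat) L0 R0 (-1)) le_rfl h1 h2 h3 h4]
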